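-- pv_equiv track=rewrite | github.com/oliviernguyenquoc/advent_of_code | day14/day14_v2.py | modify_bits_part1
-- ===== SOURCE A (Python) =====
-- def modify_bits_part1(mask: str, bit_value: str) -> int:
--
--     bit_level = 0
--
--     for bit in reversed(mask):
--         if bit in ["0", "1"]:
--             last_bit = bit_value >> bit_level
--             if (last_bit & 0b1) != int(bit, 2):
--                 if (last_bit & 0b1) == 0b0:
--                     bit_value += 2 ** bit_level
--                 else:
--                     bit_value -= 2 ** bit_level
--
--         bit_level += 1
--
--     return bit_value
-- ===== SOURCE B (Python) =====
-- def modify_bits_part1(mask: str, bit_value: int) -> int: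
--     # Decompose bit_value bit by bit with divmod, forcing each bit the mask
--     # fixes, and rebuild the number from the low end; the leftover quotient
--     # keeps all bits above the mask unchanged.
--     low = 0
--     q = bit_value
--     p = 1
--     for c in reversed(mask):
--         q, r = divmod(q, 2)
--         if c == '1':
--             r = 1
--         elif c == '0':
--             r = 0
--         low += r * p
--         p *= 2
--     return q * p + low
-- ===== Notes on version B (the rewrite author's own statement) =====
-- stated objective: alternative
-- what changed: A tests each forced bit of the running value with shift/AND and conditionally adds or subtracts 2**level; B instead shreds the value into bits with divmod, substituting the mask's forced bits, and rebuilds the number from the low end, leaving the final quotient to carry all bits above the mask untouched.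
import Mathlib
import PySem

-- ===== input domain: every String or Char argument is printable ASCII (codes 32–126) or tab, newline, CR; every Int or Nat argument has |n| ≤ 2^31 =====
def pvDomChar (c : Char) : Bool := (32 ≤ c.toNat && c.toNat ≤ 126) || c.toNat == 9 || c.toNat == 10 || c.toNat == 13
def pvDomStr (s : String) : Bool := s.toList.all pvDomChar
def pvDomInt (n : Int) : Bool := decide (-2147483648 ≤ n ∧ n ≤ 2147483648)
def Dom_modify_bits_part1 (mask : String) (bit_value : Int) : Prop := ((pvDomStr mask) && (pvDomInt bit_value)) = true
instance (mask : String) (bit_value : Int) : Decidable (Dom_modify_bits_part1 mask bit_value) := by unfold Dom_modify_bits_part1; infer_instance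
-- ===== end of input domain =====

-- B replaces A's test-then-add/subtract bit loop by a divmod decomposition that
-- shreds the value into bits and rebuilds it with the mask's forced bits (objective: alternative).

-- ===== PORT A =====
-- state = (bit_value, bit_level); one step of A's `for bit in reversed(mask)` body.
-- `int(bit, 2)` on the strings "0"/"1" is ported literally as the bit's value.
def pvAStep (st : Int × Nat) (bit : Char) : Int × Nat :=
  let bit_value := st.1
  let bit_level := st.2
  let bit_value :=
    if bit = '0' ∨ bit = '1' then
      let last_bit := bit_value >>> bit_level
      if PySem.Int.band last_bit 1 ≠ (if bit = '1' then (1 : Int) else 0) then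
        if PySem.Int.band last_bit 1 = 0 then bit_value + 2 ^ bit_level
        else bit_value - 2 ^ bit_level
      else bit_value
    else bit_value
  (bit_value, bit_level + 1)

def modify_bits_part1 (mask : String) (bit_value : Int) : Int :=
  (mask.toList.reverse.foldl pvAStep (bit_value, 0)).1

-- ===== PORT B =====
-- state = (low, q, p); one step of B's `for c in reversed(mask)` body.
def pvBStep (st : Int × Int × Int) (c : Char) : Int × Int × Int :=
  let low := st.1
  let q := st.2.1
  let p := st.2.2
  let q' := PySem.Int.floordiv q 2
  let r := PySem.Int.mod q 2
  let r := if c = '1' then (1 : Int) else if c = '0' then 0 else r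
  (low + r * p, q', p * 2)

def modify_bits_part1_alt (mask : String) (bit_value : Int) : Int :=
  let st := mask.toList.reverse.foldl pvBStep (0, bit_value, 1)
  st.2.1 * st.2.2 + st.1

-- ===== PRECONDITION & SPEC =====
def Spec_modify_bits_part1 (mask : String) (bit_value : Int) (out : Int) : Prop := out = modify_bits_part1_alt mask bit_value
instance (mask : String) (bit_value : Int) (out : Int) : Decidable (Spec_modify_bits_part1 mask bit_value out) := by unfold Spec_modify_bits_part1; infer_instance

-- ===== CLAIM (what is proved, stated in full; the proofs are below) =====
def Claim_equal_modify_bits_part1 : Prop := ∀ (mask : String) (bit_value : Int), Dom_modify_bits_part1 mask bit_value → Spec_modify_bits_part1 mask bit_value (modify_bits_part1 mask bit_value)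

-- ===== LEMMAS AND PROOFS =====

-- Common recursive description of "force the low bits of q by the char list, low bit last".
def pvG : List Char → Int → Int
  | [], q => q
  | c :: rest, q =>
      let r : Int := if c = '1' then 1 else if c = '0' then 0 else PySem.Int.mod q 2
      2 * pvG rest (PySem.Int.floordiv q 2) + r

lemma pvB_invariant (l : List Char) (low q p : Int) :
    (l.foldl pvBStep (low, q, p)).2.1 * (l.foldl pvBStep (low, q, p)).2.2
        + (l.foldl pvBStep (low, q, p)).1
      = low + p * pvG l q := by
  induction l generalizing low q p with
  | nil => simp only [List.foldl_nil, pvG]; ring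
  | cons c rest ih =>
      simp only [List.foldl_cons, pvBStep]
      rw [ih]
      simp only [pvG]
      ring

lemma pvAStep_eq (k : Nat) (H L : Int) (c : Char) (h0 : 0 ≤ L) (h1 : L < 2 ^ k) :
    pvAStep (2 ^ k * H + L, k) c
      = (2 ^ (k + 1) * (H / 2)
          + (2 ^ k * (if c = '1' then (1 : Int) else if c = '0' then 0 else H % 2) + L),
         k + 1) := by
  have hP : (0 : Int) < 2 ^ k := by positivity
  have hsh : (2 ^ k * H + L) >>> k = H := by
    have he : (2 : Int) ^ k * H + L = L + H * (2 : Int) ^ k := by ring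
    rw [Int.shiftRight_eq_div_pow]
    push_cast
    rw [he, Int.add_mul_ediv_right _ _ (ne_of_gt hP), Int.ediv_eq_zero_of_lt h0 h1, zero_add]
  have hband : PySem.Int.band H 1 = H % 2 := by
    rw [PySem.Int.band_one, PySem.Int.mod_eq_emod_of_pos (by norm_num)]
  obtain ⟨q, b, hb, hq⟩ : ∃ q b, H % 2 = b ∧ H = 2 * q + b := ⟨H / 2, H % 2, rfl, by omega⟩
  have hb01 : b = 0 ∨ b = 1 := by omega
  subst hq
  have hd : (2 * q + b) / 2 = q := by omega
  simp only [pvAStep, hsh, hband, hb, hd, pow_succ, Prod.mk.injEq]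
  refine ⟨?_, trivial⟩
  rcases hb01 with h | h <;> subst h <;> split_ifs <;>
    first
      | ring1
      | (exfalso; omega)
      | tauto

lemma pvA_invariant (l : List Char) (k : Nat) (H L : Int) (h0 : 0 ≤ L) (h1 : L < 2 ^ k) :
    (l.foldl pvAStep (2 ^ k * H + L, k)).1 = 2 ^ k * pvG l H + L := by
  induction l generalizing k H L with
  | nil => simp [pvG]
  | cons c rest ih =>
      have hP : (0 : Int) < 2 ^ k := by positivity
      set r : Int := if c = '1' then (1 : Int) else if c = '0' then 0 else H % 2 with hrdef
      have hr01 : r = 0 ∨ r = 1 := by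
        rw [hrdef]; split_ifs <;> omega
      rw [List.foldl_cons, pvAStep_eq k H L c h0 h1, ← hrdef,
          ih (k + 1) (H / 2) (2 ^ k * r + L)
            (by rcases hr01 with h | h <;> rw [h] <;> omega)
            (by rw [pow_succ]; rcases hr01 with h | h <;> rw [h] <;> omega)]
      simp only [pvG]
      have hfd : PySem.Int.floordiv H 2 = H / 2 :=
        PySem.Int.floordiv_eq_ediv_of_pos (by norm_num)
      have hmd : PySem.Int.mod H 2 = H % 2 :=
        PySem.Int.mod_eq_emod_of_pos (by norm_num)
      rw [hfd, hmd, ← hrdef, pow_succ]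
      ring

-- ===== VERDICT (by name: the statement is the Claim_ definition above) =====
theorem modify_bits_part1_spec : Claim_equal_modify_bits_part1 := by
  intro mask bit_value _
  unfold Spec_modify_bits_part1
  simp only [modify_bits_part1, modify_bits_part1_alt]
  rw [pvB_invariant]
  have hA := pvA_invariant mask.toList.reverse 0 bit_value 0 le_rfl (by norm_num)
  simp only [pow_zero, one_mul, add_zero] at hA
  rw [hA]
  ring
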